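-- pv_equiv track=rewrite | github.com/xinmingzh/CS1010X | Extra Practices/Extra Recursion and Iteration Qns.py | star_wars_iteration
-- ===== SOURCE A (Python) =====
-- def star_wars_iteration(num_enemy_ships):
--     """Releases just enough pulses to take down enemy ships"""
--     result = ''
--     while num_enemy_ships > 0:
--         if num_enemy_ships % 2 == 0:
--             n = '*--'
--         else:
--             n = '*-'
--         result = n + result
--         num_enemy_ships -= 1
--     return result
-- ===== SOURCE B (Python) =====
-- def star_wars_iteration(num_enemy_ships):
--     """Releases just enough pulses to take down enemy ships"""
--     m = num_enemy_ships if num_enemy_ships > 0 else 0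
--     return '*-*--' * (m // 2) + ('*-' if m % 2 == 1 else '')
-- ===== Notes on version B (the rewrite author's own statement) =====
-- stated objective: faster
-- what changed: Replaces the per-ship while-loop that prepends a block per ship by a closed form: each pair of ships contributes '*-*--' and an odd leftover adds a trailing '*-', so the result is '*-*--'*(m//2) + ('*-' if m odd) with m clamped to 0.
import Mathlib
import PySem

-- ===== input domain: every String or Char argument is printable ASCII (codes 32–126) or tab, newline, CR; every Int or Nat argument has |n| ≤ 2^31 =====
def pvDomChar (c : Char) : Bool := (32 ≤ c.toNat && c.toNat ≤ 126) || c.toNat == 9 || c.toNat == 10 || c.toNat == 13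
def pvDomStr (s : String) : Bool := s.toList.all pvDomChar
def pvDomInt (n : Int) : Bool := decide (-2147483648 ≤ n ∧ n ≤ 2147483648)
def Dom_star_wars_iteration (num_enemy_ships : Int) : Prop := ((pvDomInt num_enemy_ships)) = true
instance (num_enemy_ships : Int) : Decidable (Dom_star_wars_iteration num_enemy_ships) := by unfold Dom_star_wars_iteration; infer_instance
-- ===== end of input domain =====

-- B replaces A's per-ship prepend loop by the closed form '*-*--'*(m//2) + ('*-' if m odd), m = n clamped to 0 (simpler).

-- ===== PORT A =====
-- the while-loop of A: prepend '*--' (even) or '*-' (odd) and decrement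
def star_wars_iteration_go (num_enemy_ships : Int) (result : String) : String :=
  if _h : num_enemy_ships > 0 then
    star_wars_iteration_go (num_enemy_ships - 1)
      ((if PySem.Int.mod num_enemy_ships 2 = 0 then "*--" else "*-") ++ result)
  else result
termination_by num_enemy_ships.toNat
decreasing_by omega

def star_wars_iteration (num_enemy_ships : Int) : String :=
  star_wars_iteration_go num_enemy_ships ""

-- ===== PORT B =====
-- string repetition s * n (n ≥ 0), appending left-to-right; exact for nonnegative counts
def pvRepeat (n : Nat) (s : String) : String :=
  match n with
  | 0 => ""
  | n + 1 => pvRepeat n s ++ s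

def star_wars_iteration_alt (num_enemy_ships : Int) : String :=
  let m : Int := if num_enemy_ships > 0 then num_enemy_ships else 0
  pvRepeat (PySem.Int.floordiv m 2).toNat "*-*--" ++
    (if PySem.Int.mod m 2 = 1 then "*-" else "")

-- ===== PRECONDITION & SPEC =====
def Spec_star_wars_iteration (num_enemy_ships : Int) (out : String) : Prop := out = star_wars_iteration_alt num_enemy_ships
instance (num_enemy_ships : Int) (out : String) : Decidable (Spec_star_wars_iteration num_enemy_ships out) := by unfold Spec_star_wars_iteration; infer_instance

-- ===== CLAIM (what is proved, stated in full; the proofs are below) =====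
def Claim_equal_star_wars_iteration : Prop := ∀ (num_enemy_ships : Int), Dom_star_wars_iteration num_enemy_ships → Spec_star_wars_iteration num_enemy_ships (star_wars_iteration num_enemy_ships)

-- ===== LEMMAS AND PROOFS =====

/-- closed form on Nat -/
def pvF (k : Nat) : String :=
  pvRepeat (k / 2) "*-*--" ++ (if k % 2 = 1 then "*-" else "")

theorem pvF_succ (k : Nat) :
    pvF (k + 1) = pvF k ++ (if PySem.Int.mod ((k : Int) + 1) 2 = 0 then "*--" else "*-") := by
  have hmod : PySem.Int.mod ((k : Int) + 1) 2 = (((k + 1) % 2 : Nat) : Int) := by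
    rw [show ((k : Int) + 1) = ((k + 1 : Nat) : Int) by push_cast; ring]
    exact PySem.Int.mod_natCast (k + 1) 2
  rcases Nat.even_or_odd k with ⟨j, hj⟩ | ⟨j, hj⟩
  · subst hj
    have h2 : (j + j + 1) / 2 = j := by omega
    have h4 : (j + j + 1) % 2 = 1 := by omega
    have h3 : (j + j) / 2 = j := by omega
    have h5 : (j + j) % 2 = 0 := by omega
    rw [hmod]
    simp only [pvF, h2, h3, h4, h5]
    norm_num [String.append_assoc]
  · subst hj
    have h2 : (2 * j + 1 + 1) / 2 = j + 1 := by omega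
    have h4 : (2 * j + 1 + 1) % 2 = 0 := by omega
    have h3 : (2 * j + 1) / 2 = j := by omega
    have h5 : (2 * j + 1) % 2 = 1 := by omega
    rw [hmod]
    have hs : ("*-" ++ "*--" : String) = "*-*--" := by decide
    simp only [pvF, h2, h3, h4, h5, pvRepeat]
    norm_num [String.append_assoc, hs]

theorem go_eq (k : Nat) : ∀ acc : String, star_wars_iteration_go (k : Int) acc = pvF k ++ acc := by
  induction k with
  | zero => intro acc; rw [star_wars_iteration_go]; simp [pvF, pvRepeat]
  | succ k ih =>
    intro acc
    rw [star_wars_iteration_go]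
    have hpos : ((k : Int) + 1) > 0 := by omega
    simp only [Nat.cast_succ, hpos, dite_true]
    rw [show ((k : Int) + 1 - 1) = (k : Int) by ring, ih, pvF_succ, String.append_assoc]

theorem star_wars_iteration_spec : Claim_equal_star_wars_iteration := by
  intro n _
  unfold Spec_star_wars_iteration star_wars_iteration star_wars_iteration_alt
  by_cases h : n > 0
  · obtain ⟨k, rfl⟩ : ∃ k : Nat, n = (k : Int) := ⟨n.toNat, by omega⟩
    rw [go_eq]
    have hk : 0 < k := by exact_mod_cast h
    have e2 : (((k : Int)) / 2).toNat = k / 2 := by omega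
    have e3 : ((k : Int) % 2 = 1) ↔ (k % 2 = 1) := by omega
    simp [pvF, hk, e2, e3]
  · rw [star_wars_iteration_go]
    simp [h, pvRepeat]
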